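-- pv_equiv track=rewrite | github.com/n7tms/EverybodyCodes | 2025/q9.py | part2
-- ===== SOURCE A (Python) =====
-- from itertools import combinations
--
-- def relationship(child, p1, p2) -> int:
--
--     p1_cnt = 0
--     p2_cnt = 0
--     for i, sym in enumerate(child):
--         match = False
--         if p1[i] == sym:
--             match = True
--             p1_cnt += 1
--         if p2[i] == sym:
--             match = True
--             p2_cnt += 1
--
--         if not match:
--             return 0
--
--     return p1_cnt * p2_cnt
--
-- def part2(data):     # => 317403
--     n = len(data)
--     results = list()
--
--     for child_idx in range(n):
--         child = data[child_idx][1]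
--         for i,j in combinations(range(n), 2):
--             if i == child_idx or j == child_idx: continue
--             results.append(relationship(child, data[i][1], data[j][1]))
--
--     return sum(results)
-- ===== SOURCE B (Python) =====
-- def part2(data):
--     n = len(data)
--     strs = [s for _, s in data]
--     total = 0
--     for c in range(n):
--         child = strs[c]
--         L = len(child)
--         full = (1 << L) - 1
--         masks = []
--         cnts = []
--         for p in range(n):
--             s = strs[p]
--             m = 0
--             cnt = 0
--             for k in range(L):
--                 if s[k] == child[k]:
--                     m |= 1 << k
--                     cnt += 1
--             masks.append(m)
--             cnts.append(cnt)
--         for i in range(n):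
--             if i == c:
--                 continue
--             for j in range(i + 1, n):
--                 if j == c:
--                     continue
--                 if masks[i] | masks[j] == full:
--                     total += cnts[i] * cnts[j]
--     return total
-- ===== Notes on version B (the rewrite author's own statement) =====
-- stated objective: faster
-- what changed: Instead of re-scanning both parent strings character by character for every (child, pair) triple, B precomputes for each child one match bitmask and match count per candidate parent, so the inner pair test becomes a single bitwise OR against the full mask and an integer multiply.
-- outside the precondition, e.g. on part2([('a', 'x'), ('b', 'y'), ('c', 'zz')]): A returns 0, B raises IndexError
import Mathlib
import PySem

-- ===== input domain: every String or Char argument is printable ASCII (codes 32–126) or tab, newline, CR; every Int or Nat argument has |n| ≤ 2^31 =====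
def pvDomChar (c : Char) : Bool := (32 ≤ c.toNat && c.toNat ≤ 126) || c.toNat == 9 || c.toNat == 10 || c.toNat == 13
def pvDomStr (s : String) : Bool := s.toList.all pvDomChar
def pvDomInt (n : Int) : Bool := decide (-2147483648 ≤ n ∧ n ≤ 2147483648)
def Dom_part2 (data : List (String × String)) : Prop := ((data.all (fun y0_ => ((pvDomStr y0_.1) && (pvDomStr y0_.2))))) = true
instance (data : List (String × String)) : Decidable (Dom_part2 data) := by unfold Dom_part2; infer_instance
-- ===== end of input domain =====

-- B precomputes, per child, one match bitmask + match count per parent so the O(n^2) pair test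
-- becomes a bitwise OR against the full mask instead of a fresh character scan (objective: faster).

-- ===== PORT A =====
-- relationship's loop: early return 0 on a position matched by neither parent.
-- Python indexes p1[i]/p2[i]; inside Pre_ (all strings of equal length) every access is in
-- range, so the getD default is never read there.
def relAux : List Char → List Char → List Char → Nat → Int → Int → Int
  | [], _, _, _, c1, c2 => c1 * c2
  | sym :: rest, p1, p2, i, c1, c2 =>
    if p1.getD i ' ' = sym then
      if p2.getD i ' ' = sym then relAux rest p1 p2 (i + 1) (c1 + 1) (c2 + 1)
      else relAux rest p1 p2 (i + 1) (c1 + 1) c2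
    else if p2.getD i ' ' = sym then relAux rest p1 p2 (i + 1) c1 (c2 + 1)
    else 0

def relationship (child p1 p2 : String) : Int :=
  relAux child.toList p1.toList p2.toList 0 0 0

-- combinations(range(n), 2) enumerates exactly the pairs i < j, i.e. j ∈ range' (i+1) (n-(i+1)).
def part2 (data : List (String × String)) : Int :=
  let n := data.length
  let results := (List.range n).foldl (fun acc c =>
    let child := (data.getD c ("", "")).2
    (List.range n).foldl (fun acc i =>
      (List.range' (i + 1) (n - (i + 1))).foldl (fun acc j =>
        if i = c ∨ j = c then acc
        else acc ++ [relationship child (data.getD i ("", "")).2 (data.getD j ("", "")).2])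
        acc) acc) []
  results.sum

-- ===== PORT B =====
-- one pass over the child: bitmask of matching positions and the match count.
def maskCnt (child s : List Char) : Nat × Int :=
  (List.range child.length).foldl
    (fun mc k => if s.getD k ' ' = child.getD k ' ' then (mc.1 ||| (1 <<< k), mc.2 + 1) else mc)
    (0, 0)

def part2_alt (data : List (String × String)) : Int :=
  let n := data.length
  let strs := data.map Prod.snd
  (List.range n).foldl (fun total c =>
    let child := (strs.getD c "").toList
    let full := (1 <<< child.length) - 1
    let mcs := (List.range n).map (fun p => maskCnt child (strs.getD p "").toList)
    (List.range n).foldl (fun total i =>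
      if i = c then total
      else
        (List.range' (i + 1) (n - (i + 1))).foldl (fun total j =>
          if j = c then total
          else if (mcs.getD i (0, 0)).1 ||| (mcs.getD j (0, 0)).1 = full then
            total + (mcs.getD i (0, 0)).2 * (mcs.getD j (0, 0)).2
          else total) total) total) 0

-- ===== PRECONDITION & SPEC =====
-- Pre_ excludes ragged inputs (value strings of differing lengths): there Python A raises
-- IndexError whenever a scan outruns a shorter parent (and B raises IndexError); where A still
-- returns on such inputs its value comes from a truncated comparison that B does not perform.
def Pre_part2 (data : List (String × String)) : Prop :=
  ∀ x ∈ data, ∀ y ∈ data, x.2.toList.length = y.2.toList.length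
instance (data : List (String × String)) : Decidable (Pre_part2 data) := by
  unfold Pre_part2; infer_instance

def pvWitness_part2 : (List (String × String)) := [("a", "ab"), ("b", "cb"), ("c", "ax")]

def Spec_part2 (data : List (String × String)) (out : Int) : Prop := out = part2_alt data
instance (data : List (String × String)) (out : Int) : Decidable (Spec_part2 data out) := by
  unfold Spec_part2; infer_instance

-- ===== CLAIM (what is proved, stated in full; the proofs are below) =====
def Claim_equal_part2 : Prop :=
  ∀ (data : List (String × String)), Dom_part2 data → Pre_part2 data → Spec_part2 data (part2 data)

-- ===== LEMMAS AND PROOFS =====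

-- bounded ∀ over n+1 splits into 0 and the shifted bounded ∀ over n
lemma ball_succ (P : Nat → Prop) (n : Nat) :
    (∀ k, k < n + 1 → P k) ↔ P 0 ∧ ∀ k, k < n → P (k + 1) := by
  constructor
  · intro h; exact ⟨h 0 (by omega), fun k hk => h (k + 1) (by omega)⟩
  · rintro ⟨h0, h⟩ k hk
    cases k with
    | zero => exact h0
    | succ m => exact h m (by omega)

lemma countP_range_succ_shift (f : Nat → Bool) (n : Nat) :
    (List.range (n + 1)).countP f
      = (if f 0 then 1 else 0) + (List.range n).countP (fun k => f (k + 1)) := by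
  simp [List.range_succ_eq_map, List.countP_cons, List.countP_map, Function.comp_def]
  split_ifs <;> omega

-- characterisation of A's inner scan
set_option maxRecDepth 8192 in
lemma relAux_spec (p1 p2 : List Char) : ∀ (cs : List Char) (i : Nat) (c1 c2 : Int),
    relAux cs p1 p2 i c1 c2 =
      if ∀ k, k < cs.length → (p1.getD (i + k) ' ' = cs.getD k ' ' ∨ p2.getD (i + k) ' ' = cs.getD k ' ')
      then (c1 + ((List.range cs.length).countP (fun k => p1.getD (i + k) ' ' == cs.getD k ' ') : Int))
         * (c2 + ((List.range cs.length).countP (fun k => p2.getD (i + k) ' ' == cs.getD k ' ') : Int))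
      else 0 := by
  intro cs
  induction cs with
  | nil => intro i c1 c2; simp [relAux]
  | cons sym rest ih =>
    intro i c1 c2
    have hidx : ∀ k, i + (k + 1) = (i + 1) + k := fun k => by omega
    simp only [relAux]
    simp only [List.length_cons, ball_succ, countP_range_succ_shift]
    simp only [Nat.add_zero, List.getD_cons_zero, List.getD_cons_succ]
    have e1 : (fun k => p1.getD (i + (k + 1)) ' ' == rest.getD k ' ')
        = (fun k => p1.getD (i + 1 + k) ' ' == rest.getD k ' ') := by
      funext k; rw [hidx k]
    have e2 : (fun k => p2.getD (i + (k + 1)) ' ' == rest.getD k ' ')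
        = (fun k => p2.getD (i + 1 + k) ' ' == rest.getD k ' ') := by
      funext k; rw [hidx k]
    have econd : (∀ k, k < rest.length → (p1.getD (i + (k + 1)) ' ' = rest.getD k ' ' ∨
            p2.getD (i + (k + 1)) ' ' = rest.getD k ' '))
        = (∀ k, k < rest.length → (p1.getD (i + 1 + k) ' ' = rest.getD k ' ' ∨
            p2.getD (i + 1 + k) ' ' = rest.getD k ' ')) := by
      apply propext
      constructor
      · intro h k hk
        rw [← hidx k]
        exact h k hk
      · intro h k hk
        rw [hidx k]
        exact h k hk
    simp only [e1, e2, econd]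
    by_cases h1 : p1.getD i ' ' = sym <;> by_cases h2 : p2.getD i ' ' = sym
    · rw [if_pos h1, if_pos h2, ih (i + 1) (c1 + 1) (c2 + 1)]
      simp only [h1, h2, beq_self_eq_true, if_true, true_or, true_and]
      split_ifs with hC
      · push_cast; ring
      · rfl
    · rw [if_pos h1, if_neg h2, ih (i + 1) (c1 + 1) c2]
      have hc2 : (p2.getD i ' ' == sym) = false := by simpa using h2
      simp only [h1, hc2, beq_self_eq_true, if_true, true_or, true_and,
        Bool.false_eq_true, if_false]
      split_ifs with hC
      · push_cast; ring
      · rfl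
    · rw [if_neg h1, if_pos h2, ih (i + 1) c1 (c2 + 1)]
      have hc1 : (p1.getD i ' ' == sym) = false := by simpa using h1
      simp only [h2, hc1, beq_self_eq_true, if_true, or_true, true_and,
        Bool.false_eq_true, if_false]
      split_ifs with hC
      · push_cast; ring
      · rfl
    · rw [if_neg h1, if_neg h2]
      have hcond : ¬ ((p1.getD i ' ' = sym ∨ p2.getD i ' ' = sym) ∧
          ∀ k, k < rest.length → (p1.getD (i + 1 + k) ' ' = rest.getD k ' ' ∨
            p2.getD (i + 1 + k) ' ' = rest.getD k ' ')) := by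
        rintro ⟨h0, -⟩; rcases h0 with h | h
        · exact h1 h
        · exact h2 h
      rw [if_neg hcond]

lemma maskCnt_fst_testBit (ch s : List Char) (L k : Nat) :
    (((List.range L).foldl
        (fun mc k => if s.getD k ' ' = ch.getD k ' ' then (mc.1 ||| (1 <<< k), mc.2 + 1) else mc)
        ((0 : Nat), (0 : Int))).1).testBit k
      = (decide (k < L) && decide (s.getD k ' ' = ch.getD k ' ')) := by
  induction L with
  | zero => simp
  | succ L ih =>
    rw [List.range_succ, List.foldl_append, List.foldl_cons, List.foldl_nil]
    by_cases h : s.getD L ' ' = ch.getD L ' '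
    · rw [if_pos h]
      try dsimp only
      rw [Nat.testBit_lor, ih, Nat.one_shiftLeft, Nat.testBit_two_pow]
      by_cases hk : k = L
      · subst hk
        rw [decide_eq_true h]
        simp
      · by_cases hk2 : k < L
        · have e1 : decide (k < L) = true := decide_eq_true hk2
          have e2 : decide (L = k) = false := decide_eq_false (Ne.symm hk)
          have e3 : decide (k < L + 1) = true := decide_eq_true (by omega)
          rw [e1, e2, e3]
          simp
        · have e1 : decide (k < L) = false := decide_eq_false hk2
          have e2 : decide (L = k) = false := decide_eq_false (Ne.symm hk)
          have e3 : decide (k < L + 1) = false := decide_eq_false (by omega)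
          rw [e1, e2, e3]
          simp
    · rw [if_neg h, ih]
      by_cases hk : k = L
      · subst hk
        rw [decide_eq_false h]
        simp
      · have e : decide (k < L) = decide (k < L + 1) := decide_eq_decide.mpr (by omega)
        rw [e]

lemma maskCnt_snd (ch s : List Char) (L : Nat) :
    ((List.range L).foldl
        (fun mc k => if s.getD k ' ' = ch.getD k ' ' then (mc.1 ||| (1 <<< k), mc.2 + 1) else mc)
        ((0 : Nat), (0 : Int))).2
      = ((List.range L).countP (fun k => s.getD k ' ' == ch.getD k ' ') : Int) := by
  induction L with
  | zero => simp
  | succ L ih =>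
    rw [List.range_succ, List.foldl_append, List.foldl_cons, List.foldl_nil,
        List.countP_append]
    by_cases h : s.getD L ' ' = ch.getD L ' '
    · rw [if_pos h]
      try dsimp only
      rw [ih]
      have e : List.countP (fun k => s.getD k ' ' == ch.getD k ' ') [L] = 1 := by
        simp only [List.countP_cons, List.countP_nil]
        rw [if_pos (by simpa using h)]
      rw [e]
      push_cast
      ring
    · rw [if_neg h, ih]
      have e : List.countP (fun k => s.getD k ' ' == ch.getD k ' ') [L] = 0 := by
        simp only [List.countP_cons, List.countP_nil]
        rw [if_neg (by simpa using h)]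
      rw [e, Nat.add_zero]

lemma maskCnt_fst_testBit' (ch s : List Char) (k : Nat) :
    ((maskCnt ch s).1).testBit k
      = (decide (k < ch.length) && decide (s.getD k ' ' = ch.getD k ' ')) := by
  unfold maskCnt
  exact maskCnt_fst_testBit ch s ch.length k

lemma cover_iff (ch p1 p2 : List Char) :
    ((maskCnt ch p1).1 ||| (maskCnt ch p2).1 = (1 <<< ch.length) - 1)
      ↔ ∀ k, k < ch.length → (p1.getD k ' ' = ch.getD k ' ' ∨ p2.getD k ' ' = ch.getD k ' ') := by
  rw [Nat.one_shiftLeft]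
  constructor
  · intro hmask k hk
    have ht := congrArg (fun m => Nat.testBit m k) hmask
    simp only [Nat.testBit_lor, maskCnt_fst_testBit', Nat.testBit_two_pow_sub_one,
      decide_eq_true hk, Bool.true_and] at ht
    rw [Bool.or_eq_true] at ht
    rcases ht with h1 | h1
    · exact Or.inl (of_decide_eq_true h1)
    · exact Or.inr (of_decide_eq_true h1)
  · intro hall
    apply Nat.eq_of_testBit_eq
    intro k
    rw [Nat.testBit_lor, Nat.testBit_two_pow_sub_one, maskCnt_fst_testBit',
        maskCnt_fst_testBit']
    by_cases hk : k < ch.length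
    · rw [decide_eq_true hk, Bool.true_and, Bool.true_and]
      rcases hall k hk with h1 | h1
      · rw [decide_eq_true h1, Bool.true_or]
      · rw [decide_eq_true h1, Bool.or_true]
    · rw [decide_eq_false hk, Bool.false_and, Bool.false_and, Bool.or_false]

lemma maskCnt_snd' (ch s : List Char) :
    (maskCnt ch s).2
      = ((List.range ch.length).countP (fun k => s.getD k ' ' == ch.getD k ' ') : Int) := by
  unfold maskCnt
  exact maskCnt_snd ch s ch.length

lemma rel_eq_maskCnt (ch p1 p2 : List Char) :
    relAux ch p1 p2 0 0 0 =
      if (maskCnt ch p1).1 ||| (maskCnt ch p2).1 = (1 <<< ch.length) - 1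
      then (maskCnt ch p1).2 * (maskCnt ch p2).2 else 0 := by
  rw [relAux_spec p1 p2 ch 0 0 0]
  simp only [Nat.zero_add]
  by_cases h : ∀ k, k < ch.length → (p1.getD k ' ' = ch.getD k ' ' ∨ p2.getD k ' ' = ch.getD k ' ')
  · rw [if_pos h, if_pos ((cover_iff ch p1 p2).mpr h), maskCnt_snd', maskCnt_snd']
    ring
  · rw [if_neg h, if_neg (fun hc => h ((cover_iff ch p1 p2).mp hc))]

lemma strs_getD (data : List (String × String)) (p : Nat) (hp : p < data.length) :
    (data.map Prod.snd).getD p "" = (data.getD p ("", "")).2 := by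
  have hm : p < (data.map Prod.snd).length := by simpa using hp
  rw [List.getD_eq_getElem _ _ hm, List.getD_eq_getElem _ _ hp, List.getElem_map]

lemma part2_eq_alt (data : List (String × String)) : part2 data = part2_alt data := by
  simp only [part2, part2_alt]
  -- A side: rewrite the three nested append-folds into flatMaps
  have hA2 : ∀ (c i : Nat) (acc : List Int),
      (List.range' (i + 1) (data.length - (i + 1))).foldl (fun acc j =>
          if i = c ∨ j = c then acc
          else acc ++ [relationship (data.getD c ("", "")).2 (data.getD i ("", "")).2
              (data.getD j ("", "")).2]) acc
        = acc ++ (List.range' (i + 1) (data.length - (i + 1))).flatMap (fun j =>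
            if i = c ∨ j = c then [] else [relationship (data.getD c ("", "")).2 (data.getD i ("", "")).2
              (data.getD j ("", "")).2]) := by
    intro c i acc
    rw [PySem.List.foldl_congr_mem _ _ (fun acc j =>
        acc ++ (if i = c ∨ j = c then [] else [relationship (data.getD c ("", "")).2 (data.getD i ("", "")).2
              (data.getD j ("", "")).2])) _
      (by
        intro acc j hj
        dsimp only
        by_cases h1 : i = c ∨ j = c
        · rw [if_pos h1, if_pos h1, List.append_nil]
        · rw [if_neg h1, if_neg h1])]
    exact PySem.List.foldl_append_eq_flatMap _ _ _
  have hA1 : ∀ (c : Nat) (acc : List Int),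
      (List.range data.length).foldl (fun acc i =>
          (List.range' (i + 1) (data.length - (i + 1))).foldl (fun acc j =>
            if i = c ∨ j = c then acc
            else acc ++ [relationship (data.getD c ("", "")).2 (data.getD i ("", "")).2
              (data.getD j ("", "")).2]) acc) acc
        = acc ++ (List.range data.length).flatMap (fun i =>
            (List.range' (i + 1) (data.length - (i + 1))).flatMap (fun j =>
              if i = c ∨ j = c then [] else [relationship (data.getD c ("", "")).2 (data.getD i ("", "")).2
              (data.getD j ("", "")).2])) := by
    intro c acc
    rw [PySem.List.foldl_congr_mem _ _ (fun acc i =>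
        acc ++ (List.range' (i + 1) (data.length - (i + 1))).flatMap (fun j =>
          if i = c ∨ j = c then [] else [relationship (data.getD c ("", "")).2 (data.getD i ("", "")).2
              (data.getD j ("", "")).2])) _
      (fun acc i _ => hA2 c i acc)]
    exact PySem.List.foldl_append_eq_flatMap _ _ _
  -- B side: rewrite the accumulating folds into sums
  have hB2 : ∀ (c i : Nat) (t : Int),
      (List.range' (i + 1) (data.length - (i + 1))).foldl (fun total j =>
          if j = c then total
          else if (((List.range data.length).map (fun p => maskCnt ((data.map Prod.snd).getD c "").toList ((data.map Prod.snd).getD p "").toList)).getD i (0, 0)).1 ||| (((List.range data.length).map (fun p => maskCnt ((data.map Prod.snd).getD c "").toList ((data.map Prod.snd).getD p "").toList)).getD j (0, 0)).1 = (1 <<< ((data.map Prod.snd).getD c "").toList.length) - 1 then total + (((List.range data.length).map (fun p => maskCnt ((data.map Prod.snd).getD c "").toList ((data.map Prod.snd).getD p "").toList)).getD i (0, 0)).2 * (((List.range data.length).map (fun p => maskCnt ((data.map Prod.snd).getD c "").toList ((data.map Prod.snd).getD p "").toList)).getD j (0, 0)).2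
          else total) t
        = t + ((List.range' (i + 1) (data.length - (i + 1))).map (fun j =>
            if j = c then 0
            else if (((List.range data.length).map (fun p => maskCnt ((data.map Prod.snd).getD c "").toList ((data.map Prod.snd).getD p "").toList)).getD i (0, 0)).1 ||| (((List.range data.length).map (fun p => maskCnt ((data.map Prod.snd).getD c "").toList ((data.map Prod.snd).getD p "").toList)).getD j (0, 0)).1 = (1 <<< ((data.map Prod.snd).getD c "").toList.length) - 1 then (((List.range data.length).map (fun p => maskCnt ((data.map Prod.snd).getD c "").toList ((data.map Prod.snd).getD p "").toList)).getD i (0, 0)).2 * (((List.range data.length).map (fun p => maskCnt ((data.map Prod.snd).getD c "").toList ((data.map Prod.snd).getD p "").toList)).getD j (0, 0)).2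
            else 0)).sum := by
    intro c i t
    rw [PySem.List.foldl_congr_mem _ _ (fun total j =>
        total + (if j = c then 0
          else if (((List.range data.length).map (fun p => maskCnt ((data.map Prod.snd).getD c "").toList ((data.map Prod.snd).getD p "").toList)).getD i (0, 0)).1 ||| (((List.range data.length).map (fun p => maskCnt ((data.map Prod.snd).getD c "").toList ((data.map Prod.snd).getD p "").toList)).getD j (0, 0)).1 = (1 <<< ((data.map Prod.snd).getD c "").toList.length) - 1 then (((List.range data.length).map (fun p => maskCnt ((data.map Prod.snd).getD c "").toList ((data.map Prod.snd).getD p "").toList)).getD i (0, 0)).2 * (((List.range data.length).map (fun p => maskCnt ((data.map Prod.snd).getD c "").toList ((data.map Prod.snd).getD p "").toList)).getD j (0, 0)).2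
          else 0)) _
      (by
        intro t j hj
        dsimp only
        by_cases h1 : j = c
        · rw [if_pos h1, if_pos h1, add_zero]
        · rw [if_neg h1, if_neg h1]
          split_ifs with h2
          · rfl
          · exact (add_zero t).symm)]
    exact PySem.List.foldl_add _ _ _
  have hB1 : ∀ (c : Nat) (t : Int),
      (List.range data.length).foldl (fun total i =>
          if i = c then total
          else (List.range' (i + 1) (data.length - (i + 1))).foldl (fun total j =>
            if j = c then total
            else if (((List.range data.length).map (fun p => maskCnt ((data.map Prod.snd).getD c "").toList ((data.map Prod.snd).getD p "").toList)).getD i (0, 0)).1 ||| (((List.range data.length).map (fun p => maskCnt ((data.map Prod.snd).getD c "").toList ((data.map Prod.snd).getD p "").toList)).getD j (0, 0)).1 = (1 <<< ((data.map Prod.snd).getD c "").toList.length) - 1 then total + (((List.range data.length).map (fun p => maskCnt ((data.map Prod.snd).getD c "").toList ((data.map Prod.snd).getD p "").toList)).getD i (0, 0)).2 * (((List.range data.length).map (fun p => maskCnt ((data.map Prod.snd).getD c "").toList ((data.map Prod.snd).getD p "").toList)).getD j (0, 0)).2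
            else total) total) t
        = t + ((List.range data.length).map (fun i =>
            if i = c then 0
            else ((List.range' (i + 1) (data.length - (i + 1))).map (fun j =>
              if j = c then 0
              else if (((List.range data.length).map (fun p => maskCnt ((data.map Prod.snd).getD c "").toList ((data.map Prod.snd).getD p "").toList)).getD i (0, 0)).1 ||| (((List.range data.length).map (fun p => maskCnt ((data.map Prod.snd).getD c "").toList ((data.map Prod.snd).getD p "").toList)).getD j (0, 0)).1 = (1 <<< ((data.map Prod.snd).getD c "").toList.length) - 1 then (((List.range data.length).map (fun p => maskCnt ((data.map Prod.snd).getD c "").toList ((data.map Prod.snd).getD p "").toList)).getD i (0, 0)).2 * (((List.range data.length).map (fun p => maskCnt ((data.map Prod.snd).getD c "").toList ((data.map Prod.snd).getD p "").toList)).getD j (0, 0)).2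
              else 0)).sum)).sum := by
    intro c t
    rw [PySem.List.foldl_congr_mem _ _ (fun total i =>
        total + (if i = c then 0
          else ((List.range' (i + 1) (data.length - (i + 1))).map (fun j =>
            if j = c then 0
            else if (((List.range data.length).map (fun p => maskCnt ((data.map Prod.snd).getD c "").toList ((data.map Prod.snd).getD p "").toList)).getD i (0, 0)).1 ||| (((List.range data.length).map (fun p => maskCnt ((data.map Prod.snd).getD c "").toList ((data.map Prod.snd).getD p "").toList)).getD j (0, 0)).1 = (1 <<< ((data.map Prod.snd).getD c "").toList.length) - 1 then (((List.range data.length).map (fun p => maskCnt ((data.map Prod.snd).getD c "").toList ((data.map Prod.snd).getD p "").toList)).getD i (0, 0)).2 * (((List.range data.length).map (fun p => maskCnt ((data.map Prod.snd).getD c "").toList ((data.map Prod.snd).getD p "").toList)).getD j (0, 0)).2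
            else 0)).sum)) _ ?_]
    · exact PySem.List.foldl_add _ _ _
    · intro t i _
      dsimp only
      by_cases hic : i = c
      · rw [if_pos hic, if_pos hic, add_zero]
      · rw [if_neg hic, if_neg hic, hB2 c i t]
  rw [PySem.List.foldl_congr_mem _ _ (fun (acc : List Int) c =>
      acc ++ (List.range data.length).flatMap (fun i =>
        (List.range' (i + 1) (data.length - (i + 1))).flatMap (fun j =>
          if i = c ∨ j = c then [] else [relationship (data.getD c ("", "")).2 (data.getD i ("", "")).2
              (data.getD j ("", "")).2]))) _
    (fun acc c _ => hA1 c acc)]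
  rw [PySem.List.foldl_append_eq_flatMap]
  rw [PySem.List.foldl_congr_mem _ _ (fun (t : Int) c =>
      t + ((List.range data.length).map (fun i =>
        if i = c then 0
        else ((List.range' (i + 1) (data.length - (i + 1))).map (fun j =>
          if j = c then 0
          else if (((List.range data.length).map (fun p => maskCnt ((data.map Prod.snd).getD c "").toList ((data.map Prod.snd).getD p "").toList)).getD i (0, 0)).1 ||| (((List.range data.length).map (fun p => maskCnt ((data.map Prod.snd).getD c "").toList ((data.map Prod.snd).getD p "").toList)).getD j (0, 0)).1 = (1 <<< ((data.map Prod.snd).getD c "").toList.length) - 1 then (((List.range data.length).map (fun p => maskCnt ((data.map Prod.snd).getD c "").toList ((data.map Prod.snd).getD p "").toList)).getD i (0, 0)).2 * (((List.range data.length).map (fun p => maskCnt ((data.map Prod.snd).getD c "").toList ((data.map Prod.snd).getD p "").toList)).getD j (0, 0)).2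
          else 0)).sum)).sum) _
    (fun t c _ => hB1 c t)]
  rw [PySem.List.foldl_add]
  simp only [List.nil_append, zero_add]
  rw [List.flatMap_def, List.sum_flatten, List.map_map]
  congr 1
  apply List.map_congr_left
  intro c hc
  simp only [Function.comp_apply]
  rw [List.flatMap_def, List.sum_flatten, List.map_map]
  congr 1
  apply List.map_congr_left
  intro i hi
  simp only [Function.comp_apply]
  by_cases hic : i = c
  · subst hic
    have hnil : ∀ (l : List Nat), List.flatMap (fun _ => ([] : List Int)) l = [] := by
      intro l
      induction l with
      | nil => rfl
      | cons a l ihl => simp [ihl]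
    simp [hnil]
  · rw [if_neg hic]
    rw [List.flatMap_def, List.sum_flatten, List.map_map]
    congr 1
    apply List.map_congr_left
    intro j hj
    have hjlt : j < data.length := by
      rcases List.mem_range'.mp hj with ⟨r, hr, rfl⟩; omega
    have hilt : i < data.length := List.mem_range.mp hi
    have hclt : c < data.length := List.mem_range.mp hc
    simp only [Function.comp_apply]
    by_cases hjc : j = c
    · simp [hjc]
    · rw [if_neg hjc]
      have hor : ¬ (i = c ∨ j = c) := by tauto
      rw [if_neg hor]
      rw [List.sum_cons, List.sum_nil, add_zero]
      rw [PySem.List.getD_map_range _ _ _ _ hilt, PySem.List.getD_map_range _ _ _ _ hjlt]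
      rw [strs_getD data c hclt, strs_getD data i hilt, strs_getD data j hjlt]
      simp only [relationship]
      exact rel_eq_maskCnt _ _ _

-- ===== VERDICT (by name: the statement is the Claim_ definition above) =====
theorem part2_spec : Claim_equal_part2 := by
  intro data _ _
  unfold Spec_part2
  exact part2_eq_alt data
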